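-- pv_equiv track=rewrite | github.com/annisaindahcahyani/ez-sign-analytics | ezsign-engine/scripts/extractor.py | parse_issuer_atomic
-- ===== SOURCE A (Python) =====
-- def parse_issuer_atomic(dn_str):
--     res = {"CN": None, "O": None, "C": None}
--     if not dn_str or dn_str == "None":
--         return res
--
--     try:
--         parts = [p.strip() for p in str(dn_str).split(",")]
--         for part in parts:
--             if "=" not in part:
--                 continue
--             key, value = part.split("=", 1)
--             key = key.strip().upper()
--             value = value.strip()
--             if key == "CN":
--                 res["CN"] = value
--             elif key == "O":
--                 res["O"] = value
--             elif key == "C":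
--                 res["C"] = value
--
--         if not res["CN"]:
--             res["CN"] = str(dn_str)[:100]
--     except Exception:
--         pass
--
--     return res
-- ===== SOURCE B (Python) =====
-- def parse_issuer_atomic(dn_str):
--     res = {"CN": None, "O": None, "C": None}
--     if not dn_str or dn_str == "None":
--         return res
--     parts = str(dn_str).split(",")
--     for key in res:
--         for part in reversed(parts):
--             k, sep, v = part.partition("=")
--             if sep and k.strip().upper() == key:
--                 res[key] = v.strip()
--                 break
--     if not res["CN"]:
--         res["CN"] = str(dn_str)[:100]
--     return res
-- ===== Notes on version B (the rewrite author's own statement) =====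
-- stated objective: alternative
-- what changed: B replaces A's single forward pass that mutates three slots via if/elif branches by three independent per-key searches: for each target key it scans the comma-split parts in REVERSE and takes the first matching key/value pair (first match in reverse equals A's last-win), using str.partition instead of a membership test plus split.
import Mathlib
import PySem

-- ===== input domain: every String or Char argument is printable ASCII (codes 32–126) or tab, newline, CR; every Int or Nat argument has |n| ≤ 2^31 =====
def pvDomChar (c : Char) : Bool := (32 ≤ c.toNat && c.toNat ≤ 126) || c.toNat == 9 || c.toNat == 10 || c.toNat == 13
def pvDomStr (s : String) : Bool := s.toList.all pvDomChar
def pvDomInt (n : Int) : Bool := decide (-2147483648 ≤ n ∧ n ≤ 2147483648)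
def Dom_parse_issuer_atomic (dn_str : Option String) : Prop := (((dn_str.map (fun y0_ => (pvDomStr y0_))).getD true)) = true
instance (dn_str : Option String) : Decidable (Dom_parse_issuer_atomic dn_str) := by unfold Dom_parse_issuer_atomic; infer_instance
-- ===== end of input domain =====

-- B replaces A's single forward last-win pass by three per-key first-match scans over the
-- reversed part list (objective: alternative decomposition; same cost).

-- ===== PORT A =====

-- one iteration of A's for-loop over an (already stripped) part
def pvStepA (r : PySem.Dict String (Option String)) (part : String) :
    PySem.Dict String (Option String) :=
  if PySem.Str.isIn "=" part then
    match PySem.Str.splitMax? part "=" 1 with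
    | some (k :: v :: _) =>
      let key := PySem.Str.upper (PySem.Str.strip k)
      let value := PySem.Str.strip v
      if key = "CN" then r.insert "CN" (some value)
      else if key = "O" then r.insert "O" (some value)
      else if key = "C" then r.insert "C" (some value)
      else r
    | _ => r
  else r

def parse_issuer_atomic (dn_str : Option String) : List (String × Option String) :=
  let res0 : PySem.Dict String (Option String) :=
    PySem.Dict.mk [("CN", none), ("O", none), ("C", none)]
  match dn_str with
  | none => res0.items
  | some s =>
    if s = "" ∨ s = "None" then res0.items
    else
      -- s.split(","): sep is the non-empty literal ",", so split? is always `some`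
      let parts := ((PySem.Str.split? s ",").getD []).map PySem.Str.strip
      let res := parts.foldl pvStepA res0
      let cn := res.getD "CN" none
      let res := if cn = none ∨ cn = some "" then
          res.insert "CN" (some (PySem.Str.slice s none (some 100)))
        else res
      res.items

-- ===== PORT B =====

-- B's inner loop: first part (scanning the given list, which B calls on the reversed parts)
-- whose '='-partition yields this key; `sep` non-empty in Python = '=' occurs in the part,
-- and partition at the first '=' = split("=", 1) — ported via isIn + splitMax?, which is exact.
def pvScanB (key : String) : List String → Option String
  | [] => none
  | part :: rest =>
    let part := PySem.Str.strip part
    if PySem.Str.isIn "=" part then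
      match PySem.Str.splitMax? part "=" 1 with
      | some (k :: v :: _) =>
        if PySem.Str.upper (PySem.Str.strip k) = key then some (PySem.Str.strip v)
        else pvScanB key rest
      | _ => pvScanB key rest
    else pvScanB key rest

def parse_issuer_atomic_alt (dn_str : Option String) : List (String × Option String) :=
  match dn_str with
  | none => [("CN", none), ("O", none), ("C", none)]
  | some s =>
    if s = "" ∨ s = "None" then [("CN", none), ("O", none), ("C", none)]
    else
      let parts := (PySem.Str.split? s ",").getD []
      let cn := pvScanB "CN" parts.reverse
      let o  := pvScanB "O"  parts.reverse
      let c  := pvScanB "C"  parts.reverse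
      let cn := if cn = none ∨ cn = some "" then
          some (PySem.Str.slice s none (some 100))
        else cn
      [("CN", cn), ("O", o), ("C", c)]

-- ===== PRECONDITION & SPEC =====
def Spec_parse_issuer_atomic (dn_str : Option String) (out : List (String × Option String)) : Prop := out = parse_issuer_atomic_alt dn_str
instance (dn_str : Option String) (out : List (String × Option String)) : Decidable (Spec_parse_issuer_atomic dn_str out) := by unfold Spec_parse_issuer_atomic; infer_instance

-- ===== CLAIM (what is proved, stated in full; the proofs are below) =====
def Claim_equal_parse_issuer_atomic : Prop := ∀ (dn_str : Option String), Dom_parse_issuer_atomic dn_str → Spec_parse_issuer_atomic dn_str (parse_issuer_atomic dn_str)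

-- ===== LEMMAS AND PROOFS =====

-- first match distributes over append as Option.or
theorem pvScanB_append (key : String) (l1 l2 : List String) :
    pvScanB key (l1 ++ l2) = (pvScanB key l1).or (pvScanB key l2) := by
  induction l1 with
  | nil => simp [pvScanB]
  | cons p t ih =>
    simp only [List.cons_append, pvScanB]
    split
    · split
      · split
        · simp
        · exact ih
      · exact ih
    · exact ih

-- one A-step on a 3-key triple = or-ing in the single-part scan, coordinatewise
set_option maxHeartbeats 1000000 in
theorem pvStepA_triple (x y z : Option String) (p : String) :
    pvStepA (PySem.Dict.mk [("CN", x), ("O", y), ("C", z)]) (PySem.Str.strip p) =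
      PySem.Dict.mk [("CN", (pvScanB "CN" [p]).or x), ("O", (pvScanB "O" [p]).or y),
        ("C", (pvScanB "C" [p]).or z)] := by
  unfold pvStepA pvScanB
  by_cases h : PySem.Str.isIn "=" (PySem.Str.strip p) = true
  · simp only [h, if_pos]
    cases hsp : PySem.Str.splitMax? (PySem.Str.strip p) "=" 1 with
    | none => simp [pvScanB]
    | some l =>
      match l with
      | [] => simp [pvScanB]
      | [k] => simp [pvScanB]
      | k :: v :: rest =>
        simp only []
        by_cases h1 : PySem.Str.upper (PySem.Str.strip k) = "CN"
        · simp [h1, pvScanB, PySem.Dict.insert, PySem.Dict.contains, PySem.Dict.mk, Option.or]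
        · by_cases h2 : PySem.Str.upper (PySem.Str.strip k) = "O"
          · simp [h1, h2, pvScanB, PySem.Dict.insert, PySem.Dict.contains, PySem.Dict.mk, Option.or]
          · by_cases h3 : PySem.Str.upper (PySem.Str.strip k) = "C"
            · simp [h1, h2, h3, pvScanB, PySem.Dict.insert, PySem.Dict.contains, PySem.Dict.mk, Option.or]
            · simp [h1, h2, h3, pvScanB]
  · simp only [Bool.not_eq_true] at h
    simp only [h, Bool.false_eq_true, if_false]
    rfl

-- A's whole fold over the stripped parts, characterised by B's reverse scans
theorem pvFold_triple (l : List String) (x y z : Option String) :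
    (l.map PySem.Str.strip).foldl pvStepA (PySem.Dict.mk [("CN", x), ("O", y), ("C", z)]) =
      PySem.Dict.mk [("CN", (pvScanB "CN" l.reverse).or x), ("O", (pvScanB "O" l.reverse).or y),
        ("C", (pvScanB "C" l.reverse).or z)] := by
  induction l generalizing x y z with
  | nil => simp only [List.map_nil, List.foldl_nil, List.reverse_nil, pvScanB, Option.or]
  | cons p t ih =>
    simp only [List.map_cons, List.foldl_cons, pvStepA_triple, ih, List.reverse_cons,
      pvScanB_append, Option.or_assoc]

-- ===== VERDICT (by name: the statement is the Claim_ definition above) =====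
theorem parse_issuer_atomic_spec : Claim_equal_parse_issuer_atomic := by
  intro dn_str _
  unfold Spec_parse_issuer_atomic parse_issuer_atomic parse_issuer_atomic_alt
  cases dn_str with
  | none => rfl
  | some s =>
    simp only []
    by_cases hs : s = "" ∨ s = "None"
    · simp [hs, PySem.Dict.items, PySem.Dict.mk]
    · simp only [hs, if_false]
      rw [pvFold_triple]
      simp only [Option.or_none]
      by_cases hc : pvScanB "CN" ((PySem.Str.split? s ",").getD []).reverse = none ∨
          pvScanB "CN" ((PySem.Str.split? s ",").getD []).reverse = some ""
      · simp [hc, PySem.Dict.getD, PySem.Dict.get?, PySem.Dict.insert, PySem.Dict.contains,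
          PySem.Dict.items, PySem.Dict.mk]
      · simp [hc, PySem.Dict.getD, PySem.Dict.get?, PySem.Dict.items, PySem.Dict.mk]
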